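-- pv_equiv track=rewrite | github.com/beautiful-pixel/DS_rakuten | src/streamlit_utils/streamlit_data_loader.py | sort_models_by_order
-- ===== SOURCE A (Python) =====
-- from typing import Dict, List, Tuple, Optional
--
-- def get_model_order() -> List[str]:
--     """
--     Get canonical model ordering for consistent display.
--
--     Returns:
--         List of model name patterns in preferred order
--     """
--     return [
--         'lenet',
--         'resnet50',
--         'vit',
--         'swin',
--         'camembert',
--         'xlmr',
--         'mdeberta',
--         'flaubert'
--     ]
--
-- def sort_models_by_order(model_names: List[str]) -> List[str]:
--     """
--     Sort model names according to canonical order.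
--
--     Args:
--         model_names: List of model names to sort
--
--     Returns:
--         Sorted list of model names
--     """
--     order = get_model_order()
--
--     def get_sort_key(name):
--         # Find position in order list
--         name_lower = name.lower()
--         for i, pattern in enumerate(order):
--             if pattern in name_lower:
--                 return i
--         return len(order)  # Unknown models at the end
--
--     return sorted(model_names, key=get_sort_key)
-- ===== SOURCE B (Python) =====
-- def sort_models_by_order(model_names):
--     order = [
--         'lenet',
--         'resnet50',
--         'vit',
--         'swin',
--         'camembert',
--         'xlmr',
--         'mdeberta',
--         'flaubert'
--     ]
--
--     def key(name):
--         low = name.lower()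
--         return next((i for i, p in enumerate(order) if p in low), len(order))
--
--     buckets = [[] for _ in range(len(order) + 1)]
--     for name in model_names:
--         buckets[key(name)].append(name)
--     return [name for bucket in buckets for name in bucket]
-- ===== Notes on version B (the rewrite author's own statement) =====
-- stated objective: alternative
-- what changed: Replaces the comparison sort with a single-pass bucket (counting) sort over the 9 possible key values: each name is appended to buckets[key(name)] and the buckets are concatenated in ascending key order, which reproduces the stable sort exactly.
import Mathlib
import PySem

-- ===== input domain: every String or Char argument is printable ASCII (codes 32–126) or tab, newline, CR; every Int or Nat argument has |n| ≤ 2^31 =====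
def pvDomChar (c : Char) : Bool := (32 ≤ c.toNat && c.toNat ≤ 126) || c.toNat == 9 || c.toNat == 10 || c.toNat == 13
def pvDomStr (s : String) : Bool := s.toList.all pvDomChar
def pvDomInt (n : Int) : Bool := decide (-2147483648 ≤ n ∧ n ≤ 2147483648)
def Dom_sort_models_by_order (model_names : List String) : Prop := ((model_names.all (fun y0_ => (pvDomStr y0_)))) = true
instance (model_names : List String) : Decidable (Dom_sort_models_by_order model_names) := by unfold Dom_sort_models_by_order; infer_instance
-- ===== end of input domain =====

-- B replaces the stable comparison sort with a one-pass bucket sort over the 9 possible key values.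

-- ===== PORT A =====
-- get_model_order()
def pvOrder : List String :=
  ["lenet", "resnet50", "vit", "swin", "camembert", "xlmr", "mdeberta", "flaubert"]

-- the 'for i, pattern in enumerate(order)' loop of get_sort_key
def pvKeyALoop (name_lower : String) : List (Int × String) → Int
  | [] => (pvOrder.length : Int)          -- return len(order)
  | (i, pattern) :: rest =>
    if PySem.Str.isIn pattern name_lower then i else pvKeyALoop name_lower rest

def pvGetSortKey (name : String) : Int :=
  pvKeyALoop (PySem.Str.lower name) (PySem.List.enumerate pvOrder)

def sort_models_by_order (model_names : List String) : List String :=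
  PySem.List.sorted model_names pvGetSortKey

-- ===== PORT B =====
-- B's key(name): first index i with order[i] in name.lower(), else len(order)
def pvKeyB (name : String) : Nat :=
  let low := PySem.Str.lower name
  (pvOrder.findIdx? (fun p => PySem.Str.isIn p low)).getD pvOrder.length

def sort_models_by_order_alt (model_names : List String) : List String :=
  let buckets := model_names.foldl
    (fun bs name =>
      let k := pvKeyB name
      bs.set k (bs.getD k [] ++ [name]))
    (List.replicate (pvOrder.length + 1) [])
  buckets.flatten

-- ===== PRECONDITION & SPEC =====
def Spec_sort_models_by_order (model_names : List String) (out : List String) : Prop := out = sort_models_by_order_alt model_names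
instance (model_names : List String) (out : List String) : Decidable (Spec_sort_models_by_order model_names out) := by unfold Spec_sort_models_by_order; infer_instance

-- ===== CLAIM (what is proved, stated in full; the proofs are below) =====
def Claim_equal_sort_models_by_order : Prop := ∀ (model_names : List String), Dom_sort_models_by_order model_names → Spec_sort_models_by_order model_names (sort_models_by_order model_names)

-- ===== LEMMAS AND PROOFS =====

theorem insertBy_cons {α : Type} (b : α → α → Bool) (x y : α) (ys : List α) :
    PySem.List.insertBy b x (y :: ys) =
      if b x y then x :: y :: ys else y :: PySem.List.insertBy b x ys := rfl

theorem insertBy_append_of_not {α : Type} (b : α → α → Bool) (x : α) (A B : List α)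
    (hA : ∀ a ∈ A, b x a = false) :
    PySem.List.insertBy b x (A ++ B) = A ++ PySem.List.insertBy b x B := by
  induction A with
  | nil => simp
  | cons a A ih =>
    simp only [List.cons_append, insertBy_cons, hA a (by simp)]
    simp only [if_neg Bool.false_ne_true, List.cons_inj_right]
    exact ih (fun a' ha' => hA a' (by simp [ha']))

theorem insertBy_of_forall {α : Type} (b : α → α → Bool) (x : α) (B : List α)
    (hB : ∀ a ∈ B, b x a = true) :
    PySem.List.insertBy b x B = x :: B := by
  cases B with
  | nil => rfl
  | cons y ys => simp [insertBy_cons, hB y (by simp)]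

-- the key as computed by A's loop equals B's key (as an Int)
theorem keyALoop_eq (low : String) (order : List String) (i : Int) :
    pvKeyALoop low (PySem.List.enumerate order i) =
      (match order.findIdx? (fun p => PySem.Str.isIn p low) with
        | some j => i + (j : Int)
        | none => (pvOrder.length : Int)) := by
  induction order generalizing i with
  | nil => rw [PySem.List.enumerate_nil]; rfl
  | cons p rest ih =>
    rw [PySem.List.enumerate_cons]
    simp only [pvKeyALoop, List.findIdx?_cons, PySem.Str.isIn_eq] at ih ⊢
    by_cases h : PySem.Chars.isIn p.toList low.toList
    · simp [h]
    · simp only [h, Bool.false_eq_true, if_false, ih]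
      cases hf : List.findIdx? (fun p => PySem.Chars.isIn p.toList low.toList) rest with
      | none => simp
      | some j =>
        simp only [Option.map_some]
        push_cast
        ring

theorem keyA_eq (name : String) : pvGetSortKey name = (pvKeyB name : Int) := by
  unfold pvGetSortKey pvKeyB
  rw [keyALoop_eq]
  simp only [PySem.Str.isIn_eq]
  cases hf : List.findIdx?
      (fun p => PySem.Chars.isIn p.toList (PySem.Str.lower name).toList) pvOrder with
  | none => simp
  | some j => simp

theorem keyB_lt (name : String) : pvKeyB name < 9 := by
  unfold pvKeyB
  simp only [PySem.Str.isIn_eq]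
  cases hf : List.findIdx?
      (fun p => PySem.Chars.isIn p.toList (PySem.Str.lower name).toList) pvOrder with
  | none => simp [pvOrder]
  | some j =>
    have h := List.findIdx?_eq_some_iff_findIdx_eq.mp hf
    have : j < pvOrder.length := h.1
    simp only [Option.getD_some]
    simp [pvOrder] at this
    omega

-- canonical form: names with key k, for k over ks, in input order
def pvFL (ks : List Nat) (pre : List String) : List String :=
  ks.flatMap (fun k => pre.filter (fun x => pvKeyB x = k))

theorem mem_FL_key {ks : List Nat} {pre : List String} {a : String}
    (ha : a ∈ pvFL ks pre) : pvKeyB a ∈ ks := by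
  unfold pvFL at ha
  simp only [List.mem_flatMap, List.mem_filter, decide_eq_true_eq] at ha
  obtain ⟨k, hk, _, he⟩ := ha
  exact he ▸ hk

theorem FL_append_not_mem (ks : List Nat) (pre : List String) (x : String)
    (hx : pvKeyB x ∉ ks) : pvFL ks (pre ++ [x]) = pvFL ks pre := by
  unfold pvFL
  refine List.flatMap_congr (fun k hk => ?_)
  simp only [List.filter_append, List.filter_cons, List.filter_nil]
  have : ¬ pvKeyB x = k := fun h => hx (h ▸ hk)
  simp [this]

theorem insertBy_FL (x : String) (ks : List Nat) (pre : List String)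
    (hs : ks.Pairwise (· < ·)) (hj : pvKeyB x ∈ ks) :
    PySem.List.insertBy (fun a b => decide (pvKeyB a < pvKeyB b)) x (pvFL ks pre)
      = pvFL ks (pre ++ [x]) := by
  induction ks with
  | nil => simp at hj
  | cons k ks ih =>
    have hk_lt : ∀ k' ∈ ks, k < k' := (List.pairwise_cons.mp hs).1
    have hs' : ks.Pairwise (· < ·) := (List.pairwise_cons.mp hs).2
    have hFLcons : ∀ q, pvFL (k :: ks) q =
        q.filter (fun x => pvKeyB x = k) ++ pvFL ks q := by
      intro q; simp [pvFL]
    by_cases hxk : pvKeyB x = k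
    · -- x goes into the first bucket, after its existing content
      have hnot : pvKeyB x ∉ ks := fun h => absurd (hk_lt _ h) (by omega)
      rw [hFLcons, hFLcons,
        insertBy_append_of_not _ _ _ _
          (fun a ha => by
            have := (List.mem_filter.mp ha).2
            simp only [decide_eq_true_eq] at this
            simp [this, hxk]),
        insertBy_of_forall _ _ _
          (fun a ha => by
            have := hk_lt _ (mem_FL_key ha)
            simp; omega),
        FL_append_not_mem _ _ _ hnot]
      simp [List.filter_append, hxk]
    · have hj' : pvKeyB x ∈ ks := by
        cases List.mem_cons.mp hj with
        | inl h => exact absurd h hxk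
        | inr h => exact h
      have hkx : k < pvKeyB x := hk_lt _ hj'
      rw [hFLcons, hFLcons,
        insertBy_append_of_not _ _ _ _
          (fun a ha => by
            have := (List.mem_filter.mp ha).2
            simp only [decide_eq_true_eq] at this
            simp [this]; omega),
        ih hs' hj']
      congr 1
      simp [List.filter_append, hxk]

-- A's sort, as a fold of insertions, reaches the canonical form
theorem foldl_insertBy_FL (names pre : List String) :
    names.foldl
      (fun acc x => PySem.List.insertBy (fun a b => decide (pvKeyB a < pvKeyB b)) x acc)
      (pvFL (List.range 9) pre)
      = pvFL (List.range 9) (pre ++ names) := by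
  induction names generalizing pre with
  | nil => simp
  | cons x names ih =>
    simp only [List.foldl_cons]
    rw [insertBy_FL x _ pre (List.pairwise_lt_range) (by simp [List.mem_range, keyB_lt]),
      ih (pre ++ [x])]
    simp

theorem sortA_eq_FL (names : List String) :
    sort_models_by_order names = pvFL (List.range 9) names := by
  unfold sort_models_by_order
  rw [PySem.List.sorted_eq_foldl_insertBy]
  have hkey : (fun (acc : List String) x =>
      PySem.List.insertBy (fun a b => decide (pvGetSortKey a < pvGetSortKey b)) x acc)
      = (fun acc x =>
      PySem.List.insertBy (fun a b => decide (pvKeyB a < pvKeyB b)) x acc) := by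
    funext acc x
    have : (fun (a b : String) => decide (pvGetSortKey a < pvGetSortKey b))
        = (fun a b => decide (pvKeyB a < pvKeyB b)) := by
      funext a b
      simp [keyA_eq]
    rw [this]
  rw [hkey]
  have := foldl_insertBy_FL names []
  simpa [pvFL] using this

-- B's buckets, canonicalized
theorem set_map_range {α : Type} (n : Nat) (f : Nat → List α) (j : Nat) (x : α)
    (hj : j < n) :
    (((List.range n).map f).set j (((List.range n).map f).getD j [] ++ [x]))
      = (List.range n).map (fun k => f k ++ if k = j then [x] else []) := by
  have hgetD : ((List.range n).map f).getD j [] = f j := by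
    rw [List.getD_eq_getElem?_getD]
    simp [hj]
  rw [hgetD]
  apply List.ext_getElem
  · simp
  · intro i h1 h2
    simp only [List.length_set, List.length_map, List.length_range] at h1
    rw [List.getElem_set]
    by_cases hij : j = i
    · simp [hij, List.getElem_map, List.getElem_range]
    · have : i ≠ j := fun h => hij h.symm
      simp [hij, List.getElem_map, List.getElem_range, this]

theorem foldl_buckets (names pre : List String) :
    names.foldl
      (fun bs name => bs.set (pvKeyB name) (bs.getD (pvKeyB name) [] ++ [name]))
      ((List.range 9).map (fun k => pre.filter (fun x => pvKeyB x = k)))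
      = (List.range 9).map (fun k => (pre ++ names).filter (fun x => pvKeyB x = k)) := by
  induction names generalizing pre with
  | nil => simp
  | cons x names ih =>
    simp only [List.foldl_cons]
    rw [set_map_range 9 _ (pvKeyB x) x (keyB_lt x)]
    have hstep : (fun k => pre.filter (fun y => pvKeyB y = k) ++ if k = pvKeyB x then [x] else [])
        = (fun k => (pre ++ [x]).filter (fun y => pvKeyB y = k)) := by
      funext k
      simp only [List.filter_append, List.filter_cons, List.filter_nil]
      by_cases h : pvKeyB x = k
      · simp [h]
      · have : ¬ k = pvKeyB x := fun hh => h hh.symm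
        simp [h, this]
    rw [hstep, ih (pre ++ [x])]
    simp

theorem sortB_eq_FL (names : List String) :
    sort_models_by_order_alt names = pvFL (List.range 9) names := by
  unfold sort_models_by_order_alt
  have hrepl : (List.replicate (pvOrder.length + 1) ([] : List String))
      = (List.range 9).map (fun k => ([] : List String).filter (fun x => pvKeyB x = k)) := by
    simp [pvOrder]
  simp only [hrepl]
  rw [foldl_buckets names []]
  simp [pvFL, List.flatten_eq_flatMap, List.flatMap_map]

-- ===== VERDICT (by name: the statement is the Claim_ definition above) =====
theorem sort_models_by_order_spec : Claim_equal_sort_models_by_order := by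
  intro names _
  unfold Spec_sort_models_by_order
  rw [sortA_eq_FL, sortB_eq_FL]
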